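-- pv_equiv track=rewrite | github.com/sinanazem/rag-chatbot-telegram-data | src/search_engine/index_search.py | simple_process
-- ===== SOURCE A (Python) =====
-- def simple_process(docs, tokens, index):
--     docs_score = {}
--     for token in tokens:
--         if token in index:
--             for doc_id in index[token]['docs']:
--                     if doc_id not in docs_score.keys():
--                         docs_score[doc_id] = 1
--                     else:
--                         docs_score[doc_id] += 1
--
--     docs_score = sorted(docs_score.items(), key=lambda doc_score: doc_score[1], reverse=True)
--     result = [x for x,_ in docs_score]
--     return result
-- ===== SOURCE B (Python) =====
-- def simple_process(docs, tokens, index):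
--     postings = [d for t in tokens if t in index for d in index[t]['docs']]
--     score = {}
--     for d in postings:
--         score[d] = score.get(d, 0) + 1
--     if not score:
--         return []
--     m = max(score.values())
--     buckets = [[] for _ in range(m + 1)]
--     for d, s in score.items():
--         buckets[s].append(d)
--     out = []
--     for s in range(m, 0, -1):
--         out += buckets[s]
--     return out
-- ===== Notes on version B (the rewrite author's own statement) =====
-- stated objective: alternative
-- what changed: B first flattens all matching postings into one stream with a comprehension, counts it in a single fold, and replaces the comparison sort (sorted by score, reverse=True) with a counting/bucket sort: docs go into per-score buckets in insertion order and buckets are concatenated from the maximum score down, preserving the stable descending order exactly.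
-- outside the precondition, e.g. on simple_process([], ['t'], {'t': {}}): A raises KeyError, B raises KeyError
import Mathlib
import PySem

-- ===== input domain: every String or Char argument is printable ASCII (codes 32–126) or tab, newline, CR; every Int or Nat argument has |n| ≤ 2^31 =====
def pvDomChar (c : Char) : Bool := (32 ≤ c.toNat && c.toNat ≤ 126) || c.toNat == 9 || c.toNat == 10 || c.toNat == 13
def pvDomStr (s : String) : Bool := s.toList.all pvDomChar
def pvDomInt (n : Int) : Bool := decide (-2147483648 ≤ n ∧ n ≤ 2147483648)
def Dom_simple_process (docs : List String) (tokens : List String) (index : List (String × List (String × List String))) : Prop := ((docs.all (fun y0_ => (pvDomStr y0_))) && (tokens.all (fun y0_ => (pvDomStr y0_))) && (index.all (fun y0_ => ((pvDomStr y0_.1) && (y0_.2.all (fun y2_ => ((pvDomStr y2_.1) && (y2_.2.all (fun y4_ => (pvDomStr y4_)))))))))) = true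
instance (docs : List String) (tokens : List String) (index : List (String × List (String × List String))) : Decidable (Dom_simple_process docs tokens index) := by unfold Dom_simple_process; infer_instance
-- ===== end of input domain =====

-- B flattens all matching postings into one stream (comprehension), counts it with a single
-- fold, and replaces A's comparison sort (sorted by score, reverse=True) with a counting/bucket
-- sort read out from the top score down (alternative algorithm, same ordering).

-- shared helper: first-match lookup in a Python-dict argument (assoc list)
def pvLookup {β : Type} (l : List (String × β)) (k : String) : Option β :=
  (l.find? (fun p => p.1 == k)).map (fun p => p.2)

-- A's counting loop (for token in tokens: if token in index: for doc_id in index[token]['docs']: …)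
def pvScoreA (tokens : List String) (index : List (String × List (String × List String))) : PySem.Dict String Int :=
  tokens.foldl (fun d token =>
      match pvLookup index token with
      | none => d
      | some entry =>
        ((pvLookup entry "docs").getD []).foldl
          (fun d doc =>
            if d.contains doc = false then d.insert doc 1
            else d.insert doc (d.getD doc 0 + 1)) d)
    (PySem.Dict.empty : PySem.Dict String Int)

-- ===== PORT A =====
def simple_process (docs : List String) (tokens : List String) (index : List (String × List (String × List String))) : List String :=
  (PySem.List.sorted (pvScoreA tokens index).items (fun p => p.2) true).map (fun p => p.1)

-- B's flattened posting stream: [d for t in tokens if t in index for d in index[t]['docs']]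
def pvPostings (tokens : List String) (index : List (String × List (String × List String))) : List String :=
  (tokens.filter (fun t => (pvLookup index t).isSome)).flatMap
    (fun t => ((pvLookup index t).bind (fun e => pvLookup e "docs")).getD [])

-- B's counting pass over the stream (score[d] = score.get(d, 0) + 1)
def pvCount (P : List String) : PySem.Dict String Int :=
  P.foldl (fun d doc => d.insert doc (d.getD doc 0 + 1)) (PySem.Dict.empty : PySem.Dict String Int)

-- ===== PORT B =====
def simple_process_alt (docs : List String) (tokens : List String) (index : List (String × List (String × List String))) : List String :=
  let score := pvCount (pvPostings tokens index)
  match PySem.List.max? score.values (fun v => v) with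
  | none => []
  | some m =>
      let buckets := score.items.foldl
        (fun bs p => bs.set p.2.toNat (PySem.List.pyGetD bs p.2 [] ++ [p.1]))
        (List.replicate (m.toNat + 1) ([] : List String))
      (PySem.List.pyRange m 0 (-1)).foldl (fun acc s => acc ++ PySem.List.pyGetD buckets s []) []

-- ===== PRECONDITION & SPEC =====
-- Pre_ excludes exactly the inputs where some queried token's index entry lacks the key
-- "docs": there Python A (and Python B alike) raises KeyError.
def Pre_simple_process (docs : List String) (tokens : List String) (index : List (String × List (String × List String))) : Prop :=
  (tokens.all (fun t =>
    match pvLookup index t with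
    | none => true
    | some entry => (pvLookup entry "docs").isSome)) = true
instance (docs : List String) (tokens : List String) (index : List (String × List (String × List String))) : Decidable (Pre_simple_process docs tokens index) := by unfold Pre_simple_process; infer_instance

def pvWitness_simple_process : List String × List String × (List (String × List (String × List String))) :=
  (["d1"], ["t", "u"], [("t", [("docs", ["d1", "d2", "d1"])]), ("u", [("docs", ["d2"])])])

def Spec_simple_process (docs : List String) (tokens : List String) (index : List (String × List (String × List String))) (out : List String) : Prop := out = simple_process_alt docs tokens index
instance (docs : List String) (tokens : List String) (index : List (String × List (String × List String))) (out : List String) : Decidable (Spec_simple_process docs tokens index out) := by unfold Spec_simple_process; infer_instance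

-- ===== CLAIM (what is proved, stated in full; the proofs are below) =====
def Claim_equal_simple_process : Prop := ∀ (docs : List String) (tokens : List String) (index : List (String × List (String × List String))), Dom_simple_process docs tokens index → Pre_simple_process docs tokens index → Spec_simple_process docs tokens index (simple_process docs tokens index)

-- ===== LEMMAS AND PROOFS =====

-- The two counting steps agree: when the key is absent its current count is 0.
theorem pvCount_step_eq (d : PySem.Dict String Int) (doc : String) :
    (if d.contains doc = false then d.insert doc 1 else d.insert doc (d.getD doc 0 + 1))
      = d.insert doc (d.getD doc 0 + 1) := by
  by_cases h : d.contains doc = true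
  · simp [h]
  · have h' : d.contains doc = false := by simpa using h
    cases hf : d.items.find? (fun p => p.1 == doc) with
    | none => simp [h', PySem.Dict.getD, PySem.Dict.get?, hf]
    | some q =>
        exfalso
        have hq := List.mem_of_find?_eq_some hf
        have hpred := List.find?_some hf
        exact h (List.any_eq_true.mpr ⟨q, hq, hpred⟩)

-- folding A's per-token counting over tokens = folding the counting step over the flattened stream
theorem pvNested_eq_flat (index : List (String × List (String × List String))) :
    ∀ (tokens : List String) (d : PySem.Dict String Int),
    tokens.foldl (fun d token =>
        match pvLookup index token with
        | none => d
        | some entry =>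
          ((pvLookup entry "docs").getD []).foldl
            (fun d doc => d.insert doc (d.getD doc 0 + 1)) d) d
      = (pvPostings tokens index).foldl (fun d doc => d.insert doc (d.getD doc 0 + 1)) d := by
  intro tokens
  induction tokens with
  | nil => intro d; simp [pvPostings]
  | cons t ts ih =>
      intro d
      cases hl : pvLookup index t with
      | none =>
          simp only [List.foldl_cons, hl]
          rw [ih d]
          simp [pvPostings, hl]
      | some entry =>
          simp only [List.foldl_cons, hl]
          rw [ih _]
          simp [pvPostings, hl, List.foldl_append]

-- A's count dict is B's count of the flattened stream.
theorem pvScore_eq (tokens : List String) (index : List (String × List (String × List String))) :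
    pvScoreA tokens index = pvCount (pvPostings tokens index) := by
  unfold pvScoreA pvCount
  have hstep : (fun (d : PySem.Dict String Int) (doc : String) =>
      if d.contains doc = false then d.insert doc 1 else d.insert doc (d.getD doc 0 + 1))
      = fun d doc => d.insert doc (d.getD doc 0 + 1) := by
    funext d doc; exact pvCount_step_eq d doc
  rw [hstep]
  exact pvNested_eq_flat index tokens PySem.Dict.empty

-- counts looked up with default 0 are nonnegative
theorem pvGetD_nonneg (d : PySem.Dict String Int) (k : String)
    (h : ∀ p ∈ d.items, 1 ≤ p.2) : 0 ≤ d.getD k 0 := by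
  unfold PySem.Dict.getD PySem.Dict.get?
  cases hfind : d.items.find? (fun p => p.1 == k) with
  | none => simp
  | some q =>
      have hq := List.mem_of_find?_eq_some hfind
      have := h q hq
      simp; omega

-- every value in the count dict stays ≥ 1
theorem pvInsert_pres (d : PySem.Dict String Int) (doc : String)
    (h : ∀ p ∈ d.items, 1 ≤ p.2) :
    ∀ p ∈ (d.insert doc (d.getD doc 0 + 1)).items, 1 ≤ p.2 := by
  have hge : 0 ≤ d.getD doc 0 := pvGetD_nonneg d doc h
  intro p hp
  unfold PySem.Dict.insert at hp
  by_cases hc : d.contains doc = true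
  · simp only [hc, if_true] at hp
    rcases List.mem_map.mp hp with ⟨q, hq, hpq⟩
    by_cases hqd : (q.1 == doc) = true
    · rw [if_pos hqd] at hpq; subst hpq; simpa using by omega
    · rw [if_neg hqd] at hpq; subst hpq; exact h q hq
  · simp only [hc] at hp
    rcases List.mem_append.mp hp with hq | hq
    · exact h p hq
    · simp at hq; subst hq; simpa using by omega

theorem pvCount_pres (P : List String) : ∀ p ∈ (pvCount P).items, 1 ≤ p.2 := by
  unfold pvCount
  have main : ∀ (l : List String) (d : PySem.Dict String Int), (∀ p ∈ d.items, 1 ≤ p.2) →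
      ∀ p ∈ (l.foldl (fun d doc => d.insert doc (d.getD doc 0 + 1)) d).items, 1 ≤ p.2 := by
    intro l
    induction l with
    | nil => intro d h; simpa using h
    | cons x xs ih =>
        intro d h
        exact ih _ (pvInsert_pres d x h)
  exact main P PySem.Dict.empty (by simp [PySem.Dict.empty])

-- ----- stable descending sort = bucket concatenation -----

theorem pvFlatMap_congr {α β : Type} (l : List α) (f g : α → List β)
    (h : ∀ x ∈ l, f x = g x) : l.flatMap f = l.flatMap g := by
  induction l with
  | nil => rfl
  | cons a t ih =>
      simp only [List.flatMap_cons, h a (by simp), ih (fun x hx => h x (by simp [hx]))]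

-- insertBy places x after a block it is not "before" and in front of a block it is "before"
theorem pvInsertBy_append {α : Type} (before : α → α → Bool) (x : α) :
    ∀ (A B : List α), (∀ y ∈ A, before x y = false) → (∀ y ∈ B, before x y = true) →
    PySem.List.insertBy before x (A ++ B) = A ++ x :: B := by
  intro A
  induction A with
  | nil =>
      intro B _ hB
      cases B with
      | nil => simp [PySem.List.insertBy]
      | cons b B' => simp [PySem.List.insertBy, hB b (by simp)]
  | cons a A' ih =>
      intro B hA hB
      have ha : before x a = false := hA a (by simp)
      simp only [List.cons_append, PySem.List.insertBy, ha]
      simp [ih B (fun y hy => hA y (by simp [hy])) hB]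

theorem pvInsertBy_buckets {α : Type} (key : α → Int) (x : α) (S : List Int) (xs : List α)
    (hS : S.Pairwise (fun a b => b < a)) (hmem : key x ∈ S) :
    PySem.List.insertBy (fun a b => decide (key b < key a)) x
        (S.flatMap (fun s => xs.filter (fun y => key y = s)))
      = S.flatMap (fun s => (xs ++ [x]).filter (fun y => key y = s)) := by
  rcases List.append_of_mem hmem with ⟨S1, S2, rfl⟩
  have h1 : ∀ u ∈ S1, key x < u := by
    intro u hu
    have := (List.pairwise_append.mp hS).2.2 u hu (key x) (by simp)
    simpa using this
  have h2 : ∀ u ∈ S2, u < key x := by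
    have := (List.pairwise_append.mp hS).2.1
    rw [List.pairwise_cons] at this
    exact fun u hu => this.1 u hu
  rw [List.flatMap_append, List.flatMap_cons, List.flatMap_append, List.flatMap_cons]
  have hA : ∀ y ∈ (S1.flatMap (fun s => xs.filter (fun y => key y = s)))
      ++ xs.filter (fun y => key y = key x), (decide (key y < key x)) = false := by
    intro y hy
    rcases List.mem_append.mp hy with h | h
    · rcases List.mem_flatMap.mp h with ⟨s, hs, hyf⟩
      have : key y = s := by simpa using (List.mem_filter.mp hyf).2
      simp [this]
      exact le_of_lt (h1 s hs)
    · have : key y = key x := by simpa using (List.mem_filter.mp h).2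
      simp [this]
  have hB : ∀ y ∈ S2.flatMap (fun s => xs.filter (fun y => key y = s)), (decide (key y < key x)) = true := by
    intro y hy
    rcases List.mem_flatMap.mp hy with ⟨s, hs, hyf⟩
    have : key y = s := by simpa using (List.mem_filter.mp hyf).2
    simp [this]
    exact h2 s hs
  have hins := pvInsertBy_append (fun a b => decide (key b < key a)) x
      ((S1.flatMap (fun s => xs.filter (fun y => key y = s))) ++ xs.filter (fun y => key y = key x))
      (S2.flatMap (fun s => xs.filter (fun y => key y = s))) hA hB
  rw [List.append_assoc] at hins
  rw [hins]
  have e1 : S1.flatMap (fun s => (xs ++ [x]).filter (fun y => key y = s))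
      = S1.flatMap (fun s => xs.filter (fun y => key y = s)) := by
    apply pvFlatMap_congr
    intro u hu
    have hne : ¬ (key x = u) := ne_of_lt (h1 u hu)
    simp [List.filter_append, hne]
  have e2 : S2.flatMap (fun s => (xs ++ [x]).filter (fun y => key y = s))
      = S2.flatMap (fun s => xs.filter (fun y => key y = s)) := by
    apply pvFlatMap_congr
    intro u hu
    have hne : ¬ (key x = u) := ne_of_gt (h2 u hu)
    simp [List.filter_append, hne]
  have e3 : (xs ++ [x]).filter (fun y => key y = key x)
      = xs.filter (fun y => key y = key x) ++ [x] := by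
    simp [List.filter_append]
  rw [e1, e2, e3]
  simp

-- the countdown range m, m-1, …, 1 is strictly decreasing
theorem pvPyRange_desc (m : Int) : (PySem.List.pyRange m 0 (-1)).Pairwise (fun a b => b < a) := by
  rw [PySem.List.pyRange_neg_one_eq_reverse]
  rw [List.pairwise_reverse]
  exact PySem.List.pairwise_lt_pyRange_one _ _

-- main: the stable reverse sort by integer key is the concatenation of buckets from m down to 1
theorem pvSorted_rev_buckets {α : Type} (key : α → Int) (m : Int) :
    ∀ (xs : List α), (∀ x ∈ xs, 1 ≤ key x ∧ key x ≤ m) →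
    PySem.List.sorted xs key true
      = (PySem.List.pyRange m 0 (-1)).flatMap (fun s => xs.filter (fun y => key y = s)) := by
  intro xs
  induction xs using List.reverseRecOn with
  | nil =>
      intro _
      have : PySem.List.sorted ([] : List α) key true = [] := by
        simp [PySem.List.sorted_eq_nil_iff]
      rw [this]
      simp
  | append_singleton xs x ih =>
      intro h
      rw [PySem.List.sorted_rev_eq_foldl_insertBy, List.foldl_append]
      simp only [List.foldl_cons, List.foldl_nil]
      rw [← PySem.List.sorted_rev_eq_foldl_insertBy xs key]
      rw [ih (fun y hy => h y (by simp [hy]))]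
      apply pvInsertBy_buckets
      · exact pvPyRange_desc m
      · rcases h x (by simp) with ⟨hx1, hx2⟩
        rw [PySem.List.mem_pyRange_neg_one]
        omega

-- ----- B's bucket construction computes the per-score filters -----

def pvBuckets (m : Int) (xs : List (String × Int)) : List (List String) :=
  (List.range (m.toNat + 1)).map
    (fun s : Nat => ((xs.filter (fun q => q.2 = (s : Int))).map (fun q => q.1)))

theorem pvBuckets_length (m : Int) (xs : List (String × Int)) :
    (pvBuckets m xs).length = m.toNat + 1 := by
  simp [pvBuckets]

theorem pvBuckets_getElem (m : Int) (xs : List (String × Int)) (i : Nat) (hi : i < m.toNat + 1) :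
    (pvBuckets m xs)[i]'(by simp [pvBuckets_length, hi]) =
      ((xs.filter (fun q => q.2 = (i : Int))).map (fun q => q.1)) := by
  simp [pvBuckets]

theorem pvInitBuckets (m : Int) :
    List.replicate (m.toNat + 1) ([] : List String) = pvBuckets m [] := by
  symm
  rw [List.eq_replicate_iff]
  constructor
  · simp [pvBuckets_length]
  · intro x hx
    rcases List.mem_map.mp hx with ⟨s, _, rfl⟩
    simp

theorem pvBucketStep (m : Int) (pref : List (String × Int)) (p : String × Int)
    (h1 : 1 ≤ p.2) (h2 : p.2 ≤ m) :
    ((pvBuckets m pref).set p.2.toNat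
      (PySem.List.pyGetD (pvBuckets m pref) p.2 [] ++ [p.1]))
    = pvBuckets m (pref ++ [p]) := by
  have h0 : (0 : Int) ≤ p.2 := by omega
  have hlen : p.2 < ((pvBuckets m pref).length : Int) := by
    rw [pvBuckets_length]; push_cast; omega
  have hplt : p.2.toNat < m.toNat + 1 := by omega
  rw [PySem.List.pyGetD_eq_getElem _ _ h0 hlen]
  rw [pvBuckets_getElem m pref p.2.toNat hplt]
  apply List.ext_getElem
  · simp [pvBuckets_length]
  · intro i hi1 hi2
    have hilt : i < m.toNat + 1 := by
      simpa [pvBuckets_length] using hi2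
    rw [List.getElem_set]
    rw [pvBuckets_getElem m (pref ++ [p]) i hilt]
    by_cases hieq : p.2.toNat = i
    · rw [if_pos hieq]
      have hci : ((i : Nat) : Int) = p.2 := by omega
      have hcp : ((p.2.toNat : Nat) : Int) = p.2 := by omega
      rw [hci, hcp, List.filter_append, List.map_append]
      simp
    · rw [if_neg hieq]
      rw [pvBuckets_getElem m pref i hilt]
      have hne : ¬ (p.2 = ((i : Nat) : Int)) := by omega
      rw [List.filter_append, List.map_append]
      simp [hne]

theorem pvBucketsFold (m : Int) :
    ∀ (rest pref : List (String × Int)), (∀ q ∈ rest, 1 ≤ q.2 ∧ q.2 ≤ m) →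
    rest.foldl (fun bs p => bs.set p.2.toNat (PySem.List.pyGetD bs p.2 [] ++ [p.1]))
      (pvBuckets m pref)
    = pvBuckets m (pref ++ rest) := by
  intro rest
  induction rest with
  | nil => intro pref _; simp
  | cons p rest ih =>
      intro pref h
      rcases h p (by simp) with ⟨hp1, hp2⟩
      simp only [List.foldl_cons]
      rw [pvBucketStep m pref p hp1 hp2]
      have := ih (pref ++ [p]) (fun q hq => h q (by simp [hq]))
      rw [this]
      simp

-- reading the buckets out from m down to 1 is the flatMap of the per-score filters
theorem pvReadOut (m : Int) (xs : List (String × Int)) :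
    (PySem.List.pyRange m 0 (-1)).foldl
      (fun acc s => acc ++ PySem.List.pyGetD (pvBuckets m xs) s []) []
    = (PySem.List.pyRange m 0 (-1)).flatMap
        (fun s => (xs.filter (fun q => q.2 = s)).map (fun q => q.1)) := by
  rw [PySem.List.foldl_append_eq_flatMap]
  rw [List.nil_append]
  apply pvFlatMap_congr
  intro s hs
  rw [PySem.List.mem_pyRange_neg_one] at hs
  have h0 : (0 : Int) ≤ s := by omega
  have hlen : s < ((pvBuckets m xs).length : Int) := by
    rw [pvBuckets_length]; push_cast; omega
  have hslt : s.toNat < m.toNat + 1 := by omega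
  rw [PySem.List.pyGetD_eq_getElem _ _ h0 hlen]
  rw [pvBuckets_getElem m xs s.toNat hslt]
  have hc : ((s.toNat : Nat) : Int) = s := by omega
  rw [hc]

-- ===== VERDICT (by name: the statement is the Claim_ definition above) =====
theorem simple_process_spec : Claim_equal_simple_process := by
  intro docs tokens index _ _
  unfold Spec_simple_process simple_process simple_process_alt
  rw [pvScore_eq tokens index]
  have hpos := pvCount_pres (pvPostings tokens index)
  cases hmax : PySem.List.max? (pvCount (pvPostings tokens index)).values (fun v => v) with
  | none =>
      have hvals : (pvCount (pvPostings tokens index)).values = [] :=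
        (PySem.List.max?_eq_none_iff _ _).mp hmax
      have hitems : (pvCount (pvPostings tokens index)).items = [] := by
        have h' := hvals
        unfold PySem.Dict.values at h'
        exact List.map_eq_nil_iff.mp h'
      rw [hitems]
      have hnil : PySem.List.sorted ([] : List (String × Int)) (fun p => p.2) true = [] := by
        simp [PySem.List.sorted_eq_nil_iff]
      rw [hnil]
      simp [hmax]
  | some m =>
      have hbounds : ∀ q ∈ (pvCount (pvPostings tokens index)).items, 1 ≤ q.2 ∧ q.2 ≤ m := by
        intro q hq
        refine ⟨hpos q hq, ?_⟩
        have hv : q.2 ∈ (pvCount (pvPostings tokens index)).values := by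
          unfold PySem.Dict.values
          exact List.mem_map_of_mem hq
        simpa using PySem.List.max?_isMax hmax q.2 hv
      dsimp only
      rw [pvSorted_rev_buckets (fun p => p.2) m ((pvCount (pvPostings tokens index)).items) hbounds]
      rw [List.map_flatMap]
      rw [hmax]
      dsimp only
      rw [pvInitBuckets m]
      have hfold := pvBucketsFold m ((pvCount (pvPostings tokens index)).items) [] hbounds
      rw [List.nil_append] at hfold
      rw [hfold]
      rw [pvReadOut m ((pvCount (pvPostings tokens index)).items)]
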